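-- pv_equiv track=rewrite | github.com/sean-grogan-archive/datastructures_class | TP2/GenBinTrees.py | all_binary_trees
-- ===== SOURCE A (Python) =====
-- def all_binary_trees(s):
--     """short function to generate binary trees in the from s = 'A@B@C@D@E'"""
--     if len(s) == 1:
--         yield s
--     else:
--         for i in range(1, len(s), 2):
--             for l in all_binary_trees(s[:i]):
--                 for r in all_binary_trees(s[i+1:]):
--                     yield '({},{},{})'.format(s[i], l, r)
-- ===== SOURCE B (Python) =====
-- def all_binary_trees(s):
--     """Bottom-up dynamic programming: build the tree lists for every substring
--     s[i:i+m] of odd length m once, shortest lengths first, so no subproblem is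
--     ever re-enumerated."""
--     n = len(s)
--     if n == 1:
--         yield s
--         return
--     if n % 2 == 0:
--         return
--     memo = {}
--     for i in range(n):
--         memo[(i, 1)] = [s[i]]
--     for m in range(3, n + 1, 2):
--         for i in range(0, n - m + 1):
--             out = []
--             for k in range(1, m, 2):
--                 root = s[i + k]
--                 for l in memo[(i, k)]:
--                     for r in memo[(i + k + 1, m - k - 1)]:
--                         out.append('(' + root + ',' + l + ',' + r + ')')
--             memo[(i, m)] = out
--     yield from memo[(0, n)]
-- ===== Notes on version B (the rewrite author's own statement) =====
-- stated objective: faster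
-- what changed: Replaces the exponentially re-enumerating recursion over string slices by a bottom-up dynamic-programming table that builds the tree list for every (start, odd length) substring exactly once, shortest lengths first.
import Mathlib
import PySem

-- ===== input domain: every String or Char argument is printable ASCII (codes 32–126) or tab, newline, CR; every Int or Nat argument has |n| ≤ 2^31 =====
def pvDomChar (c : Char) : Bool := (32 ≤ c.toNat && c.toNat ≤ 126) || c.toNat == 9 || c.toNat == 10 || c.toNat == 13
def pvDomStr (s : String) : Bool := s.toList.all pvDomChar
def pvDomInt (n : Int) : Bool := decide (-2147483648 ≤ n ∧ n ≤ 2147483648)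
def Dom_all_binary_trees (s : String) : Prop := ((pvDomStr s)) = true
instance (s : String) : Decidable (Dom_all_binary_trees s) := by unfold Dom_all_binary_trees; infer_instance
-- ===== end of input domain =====

-- B replaces A's re-enumerating recursion by a bottom-up memo table over (start, odd length)
-- substrings, each built once (objective: faster; A and B are generators, compared as the
-- yielded sequence).


-- ===== PORT A =====
-- A's recursion on string slices; fuel = length is a pure totality guard (every recursive
-- call keeps fuel ≥ length, and fuel 0 is reached only on the empty list, where A yields nothing).
def pvAbtA : Nat → List Char → List (List Char)
  | 0, _ => []
  | fuel + 1, cs =>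
    if cs.length = 1 then [cs]
    else
      (PySem.List.pyRange 1 (PySem.List.len cs) 2).foldl
        (fun acc i =>
          acc ++ (pvAbtA fuel (cs.take i.toNat)).flatMap (fun l =>
            (pvAbtA fuel (cs.drop (i.toNat + 1))).map (fun r =>
              '(' :: PySem.List.pyGetD cs i ' ' :: ',' :: (l ++ ',' :: (r ++ [')'])))))
        []

def all_binary_trees (s : String) : List String :=
  (pvAbtA s.toList.length s.toList).map String.ofList

-- ===== PORT B =====
-- one row of B's table: the trees for s[i:i+m], combining memoized smaller entries
def pvRow (cs : List Char) (memo : PySem.Dict (Int × Int) (List (List Char)))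
    (i m : Int) : List (List Char) :=
  (PySem.List.pyRange 1 m 2).foldl
    (fun out k =>
      out ++ (memo.getD (i, k) []).flatMap (fun l =>
        (memo.getD (i + k + 1, m - k - 1) []).map (fun r =>
          '(' :: PySem.List.pyGetD cs (i + k) ' ' :: ',' :: (l ++ ',' :: (r ++ [')'])))))
    []

-- B's memo dict: base entries (i,1), then every (i,m) for odd m = 3,5,…,n, shortest first
def pvTable (cs : List Char) : PySem.Dict (Int × Int) (List (List Char)) :=
  (PySem.List.pyRange 3 (PySem.List.len cs + 1) 2).foldl
    (fun d m =>
      (PySem.List.pyRange 0 (PySem.List.len cs - m + 1) 1).foldl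
        (fun d i => d.insert (i, m) (pvRow cs d i m)) d)
    ((PySem.List.pyRange 0 (PySem.List.len cs) 1).foldl
      (fun d i => d.insert (i, 1) [[PySem.List.pyGetD cs i ' ']]) PySem.Dict.empty)

def all_binary_trees_alt (s : String) : List String :=
  let cs := s.toList
  if cs.length = 1 then [s]
  else if PySem.Int.mod (PySem.List.len cs) 2 = 0 then []
  else ((pvTable cs).getD (0, (cs.length : Int)) []).map String.ofList

-- ===== PRECONDITION & SPEC =====
def Spec_all_binary_trees (s : String) (out : List String) : Prop := out = all_binary_trees_alt s
instance (s : String) (out : List String) : Decidable (Spec_all_binary_trees s out) := by unfold Spec_all_binary_trees; infer_instance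

-- ===== CLAIM (what is proved, stated in full; the proofs are below) =====
def Claim_equal_all_binary_trees : Prop := ∀ (s : String), Dom_all_binary_trees s → Spec_all_binary_trees s (all_binary_trees s)

-- ===== LEMMAS AND PROOFS =====

-- the fuel argument is irrelevant once it covers the length
theorem pvAbtA_canon : ∀ (f : Nat) (cs : List Char), cs.length ≤ f →
    pvAbtA f cs = pvAbtA cs.length cs := by
  intro f
  induction f using Nat.strong_induction_on with
  | _ f IH =>
    intro cs hf
    cases f with
    | zero =>
      have hnil : cs = [] := List.eq_nil_of_length_eq_zero (by omega)
      subst hnil; rfl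
    | succ f' =>
      by_cases hL : cs.length = f' + 1
      · rw [hL]
      · cases hn : cs.length with
        | zero =>
          have hnil : cs = [] := List.eq_nil_of_length_eq_zero hn
          subst hnil; rfl
        | succ L =>
          simp only [pvAbtA]
          by_cases h1 : cs.length = 1
          · simp [h1]
          · rw [if_neg h1, if_neg h1]
            apply PySem.List.foldl_congr_mem
            intro acc x hx
            rw [PySem.List.mem_pyRange_iff_of_pos (by norm_num)] at hx
            simp only [PySem.List.len_eq] at hx
            obtain ⟨hx1, hx2, hx3⟩ := hx
            have e1 : pvAbtA f' (cs.take x.toNat) = pvAbtA L (cs.take x.toNat) := by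
              rw [IH f' (by omega) _ (by simp; omega), IH L (by omega) _ (by simp; omega)]
            have e2 : pvAbtA f' (cs.drop (x.toNat + 1)) = pvAbtA L (cs.drop (x.toNat + 1)) := by
              rw [IH f' (by omega) _ (by simp; omega), IH L (by omega) _ (by simp; omega)]
            simp only [e1, e2]

theorem pvAbtA_fuel (f g : Nat) (cs : List Char) (hf : cs.length ≤ f) (hg : cs.length ≤ g) :
    pvAbtA f cs = pvAbtA g cs := by
  rw [pvAbtA_canon f cs hf, pvAbtA_canon g cs hg]

-- A yields nothing on even-length input
theorem pvAbtA_even : ∀ (f : Nat) (cs : List Char), cs.length % 2 = 0 → pvAbtA f cs = [] := by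
  intro f
  induction f with
  | zero => intro cs h; rfl
  | succ f IH =>
    intro cs h
    have h1 : cs.length ≠ 1 := by omega
    simp only [pvAbtA, if_neg h1]
    have hbody : ∀ (acc : List (List Char)), ∀ x ∈ PySem.List.pyRange 1 (PySem.List.len cs) 2,
        (acc ++ (pvAbtA f (cs.take x.toNat)).flatMap (fun l =>
          (pvAbtA f (cs.drop (x.toNat + 1))).map (fun r =>
            '(' :: PySem.List.pyGetD cs x ' ' :: ',' :: (l ++ ',' :: (r ++ [')'])))))
        = acc ++ ([] : List (List Char)) := by
      intro acc x hx
      rw [PySem.List.mem_pyRange_iff_of_pos (by norm_num)] at hx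
      simp only [PySem.List.len_eq] at hx
      have hr : pvAbtA f (cs.drop (x.toNat + 1)) = [] := IH _ (by simp; omega)
      simp [hr]
    rw [PySem.List.foldl_congr_mem _ _ _ _ hbody, PySem.List.foldl_append_eq_flatMap]
    simp

-- B's row computation produces exactly A's list for the slice, given a correct memo below m
theorem pvRow_spec (cs : List Char) (memo : PySem.Dict (Int × Int) (List (List Char)))
    (i m : Nat) (hm : 3 ≤ m) (hodd : m % 2 = 1) (hin : i + m ≤ cs.length)
    (hmemo : ∀ i' m' : Nat, m' % 2 = 1 → m' < m → i' + m' ≤ cs.length →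
      memo.getD ((i' : Int), (m' : Int)) [] = pvAbtA m' ((cs.drop i').take m')) :
    pvRow cs memo (i : Int) (m : Int) = pvAbtA m ((cs.drop i).take m) := by
  have hlen : ((cs.drop i).take m).length = m := by simp; omega
  obtain ⟨M, rfl⟩ : ∃ M, m = M + 1 := ⟨m - 1, by omega⟩
  simp only [pvRow, pvAbtA, PySem.List.len_eq, hlen]
  rw [if_neg (show ¬ (M + 1 = 1) by omega)]
  apply PySem.List.foldl_congr_mem
  intro acc k hk
  rw [PySem.List.mem_pyRange_iff_of_pos (by norm_num)] at hk
  obtain ⟨hk1, hk2, hk3⟩ := hk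
  obtain ⟨kn, rfl⟩ : ∃ kn : Nat, k = (kn : Int) := ⟨k.toNat, by omega⟩
  have hkn1 : 1 ≤ kn := by omega
  have hkn2 : kn < M + 1 := by omega
  have hknodd : kn % 2 = 1 := by omega
  have ea : (i : Int) + (kn : Int) + 1 = ((i + kn + 1 : Nat) : Int) := by push_cast; ring
  have eb : (((M + 1 : Nat)) : Int) - (kn : Int) - 1 = ((M - kn : Nat) : Int) := by omega
  have e1 : memo.getD ((i : Int), (kn : Int)) [] = pvAbtA kn ((cs.drop i).take kn) :=
    hmemo i kn hknodd (by omega) (by omega)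
  have e2 : memo.getD (((i + kn + 1 : Nat) : Int), ((M - kn : Nat) : Int)) []
      = pvAbtA (M - kn) ((cs.drop (i + kn + 1)).take (M - kn)) :=
    hmemo _ _ (by omega) (by omega) (by omega)
  have e3 : pvAbtA M (((cs.drop i).take (M + 1)).take kn) = pvAbtA kn ((cs.drop i).take kn) := by
    rw [List.take_take, Nat.min_eq_left (by omega)]
    exact pvAbtA_fuel M kn _ (by simp only [List.length_take, List.length_drop]; omega)
      (by simp only [List.length_take, List.length_drop]; omega)
  have e4 : pvAbtA M (((cs.drop i).take (M + 1)).drop (kn + 1))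
      = pvAbtA (M - kn) ((cs.drop (i + kn + 1)).take (M - kn)) := by
    rw [List.drop_take, List.drop_drop]
    rw [show M + 1 - (kn + 1) = M - kn from by omega]
    rw [show i + (kn + 1) = i + kn + 1 from by omega]
    exact pvAbtA_fuel M (M - kn) _ (by simp only [List.length_take, List.length_drop]; omega)
      (by simp only [List.length_take, List.length_drop]; omega)
  have e5 : PySem.List.pyGetD ((cs.drop i).take (M + 1)) ((kn : Nat) : Int) ' '
      = PySem.List.pyGetD cs ((i : Int) + (kn : Int)) ' ' := by
    rw [PySem.List.pyGetD_eq_getElem _ _ (by omega) (by rw [hlen]; omega),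
        PySem.List.pyGetD_eq_getElem _ _ (by omega) (by omega)]
    have hidx : (((i : Int) + (kn : Int))).toNat = i + kn := by omega
    have hidx2 : (((kn : Nat) : Int)).toNat = kn := by omega
    simp only [hidx, hidx2]
    rw [List.getElem_take, List.getElem_drop]
  simp only [Int.toNat_natCast, ea, eb, e1, e2, e3, e4, e5]

-- correctness of a memo dict for all odd lengths up to M
def pvGood (cs : List Char) (d : PySem.Dict (Int × Int) (List (List Char))) (M : Nat) : Prop :=
  ∀ i m : Nat, m % 2 = 1 → m ≤ M → i + m ≤ cs.length →
    d.getD ((i : Int), (m : Int)) [] = pvAbtA m ((cs.drop i).take m)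

-- the base loop, processed up to start index b
theorem pvBase_aux (cs : List Char) : ∀ (b : Nat) (i m : Nat),
    ((PySem.List.pyRange 0 (b : Int) 1).foldl
      (fun d i => d.insert (i, 1) [[PySem.List.pyGetD cs i ' ']]) PySem.Dict.empty).getD
        ((i : Int), (m : Int)) []
    = if i < b ∧ m = 1 then [[PySem.List.pyGetD cs (i : Int) ' ']] else [] := by
  intro b
  induction b with
  | zero =>
    intro i m
    rw [PySem.List.pyRange_one_eq_nil (by omega)]
    simp [PySem.Dict.getD_empty]
  | succ b IH =>
    intro i m
    rw [show ((b + 1 : Nat) : Int) = (b : Int) + 1 from by push_cast; ring,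
        PySem.List.pyRange_one_succ_right (by omega), List.foldl_append]
    simp only [List.foldl_cons, List.foldl_nil]
    rw [PySem.Dict.getD_insert]
    by_cases h : ((i : Int), (m : Int)) = ((b : Int), (1 : Int))
    · rw [if_pos h]
      rw [Prod.mk.injEq] at h
      have hib : i = b ∧ m = 1 := by omega
      rw [if_pos ⟨by omega, hib.2⟩, hib.1]
    · rw [if_neg h, IH i m]
      have h' : ¬ (i = b ∧ m = 1) := by
        intro ⟨e1, e2⟩; exact h (by simp [e1, e2])
      have hiff : (i < b ∧ m = 1) ↔ (i < b + 1 ∧ m = 1) := by omega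
      rw [if_congr hiff rfl rfl]

-- the base entries are correct at level 1
theorem pvBase_good (cs : List Char) :
    pvGood cs ((PySem.List.pyRange 0 (PySem.List.len cs) 1).foldl
      (fun d i => d.insert (i, 1) [[PySem.List.pyGetD cs i ' ']]) PySem.Dict.empty) 1 := by
  intro i m hodd hm hin
  have hm1 : m = 1 := by omega
  subst hm1
  have hi : i < cs.length := by omega
  rw [show PySem.List.len cs = ((cs.length : Nat) : Int) from by simp [PySem.List.len_eq],
      pvBase_aux cs cs.length i 1, if_pos ⟨hi, rfl⟩]
  rw [List.drop_eq_getElem_cons hi]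
  simp only [List.take_succ_cons, List.take_zero]
  rw [show pvAbtA 1 [cs[i]] = [[cs[i]]] from rfl]
  rw [PySem.List.pyGetD_eq_getElem cs ' ' (by omega) (by omega)]
  simp

-- one inner loop (fixed odd m ≥ 3), processed up to start index b
theorem pvInner_aux (cs : List Char) (m : Nat) (hm : 3 ≤ m) (hodd : m % 2 = 1) :
    ∀ (b : Nat), b + m ≤ cs.length + 1 →
      ∀ (d : PySem.Dict (Int × Int) (List (List Char))), pvGood cs d (m - 2) →
      pvGood cs ((PySem.List.pyRange 0 (b : Int) 1).foldl
        (fun d i => d.insert (i, (m : Int)) (pvRow cs d i (m : Int))) d) (m - 2)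
      ∧ ∀ i : Nat, i < b →
        ((PySem.List.pyRange 0 (b : Int) 1).foldl
          (fun d i => d.insert (i, (m : Int)) (pvRow cs d i (m : Int))) d).getD
            ((i : Int), (m : Int)) []
        = pvAbtA m ((cs.drop i).take m) := by
  intro b
  induction b with
  | zero =>
    intro hb d hd
    rw [PySem.List.pyRange_one_eq_nil (by omega)]
    exact ⟨by simpa using hd, by intro i h; omega⟩
  | succ b IH =>
    intro hb d hd
    obtain ⟨IH1, IH2⟩ := IH (by omega) d hd
    rw [show ((b + 1 : Nat) : Int) = (b : Int) + 1 from by push_cast; ring,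
        PySem.List.pyRange_one_succ_right (by omega), List.foldl_append]
    simp only [List.foldl_cons, List.foldl_nil]
    have hrow : pvRow cs ((PySem.List.pyRange 0 (b : Int) 1).foldl
        (fun d i => d.insert (i, (m : Int)) (pvRow cs d i (m : Int))) d) (b : Int) (m : Int)
        = pvAbtA m ((cs.drop b).take m) := by
      apply pvRow_spec cs _ b m hm hodd (by omega)
      intro i' m' ho' hlt hle
      exact IH1 i' m' ho' (by omega) hle
    constructor
    · intro i' m' ho' hle' hin'
      rw [PySem.Dict.getD_insert, if_neg (by intro hpair; rw [Prod.mk.injEq] at hpair; omega)]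
      exact IH1 i' m' ho' hle' hin'
    · intro i hi
      rw [PySem.Dict.getD_insert]
      by_cases hib : i = b
      · subst hib
        rw [if_pos rfl, hrow]
      · rw [if_neg (by intro hpair; rw [Prod.mk.injEq] at hpair; omega)]
        exact IH2 i (by omega)

-- the whole inner loop fills level m and keeps lower levels
theorem pvInner_step (cs : List Char) (m : Nat) (hm : 3 ≤ m) (hodd : m % 2 = 1)
    (d : PySem.Dict (Int × Int) (List (List Char))) (hd : pvGood cs d (m - 2)) :
    pvGood cs ((PySem.List.pyRange 0 (PySem.List.len cs - (m : Int) + 1) 1).foldl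
      (fun d i => d.insert (i, (m : Int)) (pvRow cs d i (m : Int))) d) m := by
  by_cases hmn : m ≤ cs.length
  · rw [show PySem.List.len cs - (m : Int) + 1 = ((cs.length - m + 1 : Nat) : Int) from by
      simp [PySem.List.len_eq]; omega]
    obtain ⟨h1, h2⟩ := pvInner_aux cs m hm hodd (cs.length - m + 1) (by omega) d hd
    intro i m' ho' hle' hin'
    by_cases hmm : m' = m
    · subst hmm; exact h2 i (by omega)
    · exact h1 i m' ho' (by omega) hin'
  · rw [PySem.List.pyRange_one_eq_nil (by simp [PySem.List.len_eq]; omega)]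
    simp only [List.foldl_nil]
    intro i m' ho' hle' hin'
    by_cases hmm : m' = m
    · omega
    · exact hd i m' ho' (by omega) hin'

-- the outer loop over odd lengths 3,5,…,2t+1
theorem pvOuter_aux (cs : List Char) : ∀ t : Nat, 2 * t + 1 ≤ cs.length →
    pvGood cs (((List.range t).map (fun (k : Nat) => (3 : Int) + 2 * (k : Int))).foldl
      (fun d m =>
        (PySem.List.pyRange 0 (PySem.List.len cs - m + 1) 1).foldl
          (fun d i => d.insert (i, m) (pvRow cs d i m)) d)
      ((PySem.List.pyRange 0 (PySem.List.len cs) 1).foldl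
        (fun d i => d.insert (i, 1) [[PySem.List.pyGetD cs i ' ']]) PySem.Dict.empty))
      (2 * t + 1) := by
  intro t
  induction t with
  | zero => intro h; simpa using pvBase_good cs
  | succ t IH =>
    intro h
    rw [List.range_succ, List.map_append, List.foldl_append]
    simp only [List.map_cons, List.map_nil, List.foldl_cons, List.foldl_nil]
    rw [show (3 + 2 * (t : Int)) = ((2 * t + 3 : Nat) : Int) from by push_cast; ring]
    have hd := IH (by omega)
    rw [show 2 * t + 1 = 2 * t + 3 - 2 from by omega] at hd
    have hres := pvInner_step cs (2 * t + 3) (by omega) (by omega) _ hd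
    rw [show 2 * (t + 1) + 1 = 2 * t + 3 from by omega]
    exact hres

-- the full table is correct up to the whole (odd) string length
theorem pvTable_good (cs : List Char) (hodd : cs.length % 2 = 1) :
    pvGood cs (pvTable cs) cs.length := by
  simp only [pvTable]
  rw [PySem.List.pyRange_of_pos 3 (PySem.List.len cs + 1) (by norm_num : (0 : Int) < 2)]
  rw [show (if (3 : Int) < PySem.List.len cs + 1
        then ((PySem.List.len cs + 1 - 3 + 2 - 1) / 2).toNat else 0) = (cs.length - 1) / 2 from by
    simp only [PySem.List.len_eq]; split_ifs <;> omega]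
  have hg := pvOuter_aux cs ((cs.length - 1) / 2) (by omega)
  intro i m ho hm hin
  exact hg i m ho (by omega) hin

-- ===== VERDICT (by name: the statement is the Claim_ definition above) =====
theorem all_binary_trees_spec : Claim_equal_all_binary_trees := by
  intro s _
  unfold Spec_all_binary_trees
  simp only [all_binary_trees, all_binary_trees_alt]
  by_cases h1 : s.toList.length = 1
  · rw [if_pos h1, h1]
    rw [show pvAbtA 1 s.toList = [s.toList] from by simp [pvAbtA, h1]]
    simp [String.ofList_toList]
  · rw [if_neg h1]
    by_cases h2 : s.toList.length % 2 = 0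
    · rw [if_pos (show PySem.Int.mod (PySem.List.len s.toList) 2 = 0 from by
        rw [show PySem.List.len s.toList = ((s.toList.length : Nat) : Int) from by
          simp [PySem.List.len_eq]]
        rw [show ((2 : Int)) = ((2 : Nat) : Int) from rfl, PySem.Int.mod_natCast, h2]
        rfl)]
      rw [pvAbtA_even _ _ h2]
      rfl
    · rw [if_neg (show ¬ PySem.Int.mod (PySem.List.len s.toList) 2 = 0 from by
        rw [show PySem.List.len s.toList = ((s.toList.length : Nat) : Int) from by
          simp [PySem.List.len_eq]]
        rw [show ((2 : Int)) = ((2 : Nat) : Int) from rfl, PySem.Int.mod_natCast]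
        omega)]
      have hg := pvTable_good s.toList (by omega) 0 s.toList.length (by omega) (le_refl _) (by omega)
      simp only [List.drop_zero, List.take_length, Nat.cast_zero] at hg
      rw [hg]
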